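-- pv_equiv track=rewrite | github.com/emersonfelipesp/netbox-sdk | netbox_cli/ui/formatting.py | order_field_names
-- ===== SOURCE A (Python) =====
-- _FIELD_PRIORITY = [
--     "id",
--     "name",
--     "display",
--     "label",
--     "status",
--     "type",
--     "role",
--     "site",
--     "location",
--     "device",
--     "interface",
--     "ip",
--     "address",
--     "prefix",
--     "vlan",
--     "tenant",
--     "description",
--     "created",
--     "last_updated",
--     "url",
-- ]
--
-- def order_field_names(names: list[str]) -> list[str]:
--     priority_index = {name: idx for idx, name in enumerate(_FIELD_PRIORITY)}
--
--     def sort_key(field: str) -> tuple[int, int, str]: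
--         lower = field.lower()
--         for token, idx in priority_index.items():
--             if lower == token:
--                 return (0, idx, lower)
--         for token, idx in priority_index.items():
--             if lower.endswith(f"_{token}") or lower.endswith(f"-{token}"):
--                 return (1, idx, lower)
--         return (2, 0, lower)
--
--     return sorted(names, key=sort_key)
-- ===== SOURCE B (Python) =====
-- _FIELD_PRIORITY = [
--     "id",
--     "name",
--     "display",
--     "label",
--     "status",
--     "type",
--     "role",
--     "site",
--     "location",
--     "device",
--     "interface",
--     "ip",
--     "address",
--     "prefix",
--     "vlan",
--     "tenant",
--     "description",
--     "created",
--     "last_updated",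
--     "url",
-- ]
--
-- def order_field_names(names: list[str]) -> list[str]:
--     index = {tok: i for i, tok in enumerate(_FIELD_PRIORITY)}
--     exact, suffix, rest = [], [], []
--     for name in names:
--         lower = name.lower()
--         i = index.get(lower)
--         if i is not None:
--             exact.append((i, lower, name))
--             continue
--         for tok, j in index.items():
--             if lower.endswith("_" + tok) or lower.endswith("-" + tok):
--                 suffix.append((j, lower, name))
--                 break
--         else:
--             rest.append((lower, name))
--     exact.sort(key=lambda t: (t[0], t[1]))
--     suffix.sort(key=lambda t: (t[0], t[1]))
--     rest.sort(key=lambda t: t[0])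
--     return [t[2] for t in exact] + [t[2] for t in suffix] + [t[1] for t in rest]
-- ===== Notes on version B (the rewrite author's own statement) =====
-- stated objective: alternative
-- what changed: Instead of one global sort whose key function rescans the priority dict per element, B makes a single classification pass into three buckets (exact / suffix / other, with precomputed indices), stably sorts each bucket by its own sub-key, and concatenates.
import Mathlib
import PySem

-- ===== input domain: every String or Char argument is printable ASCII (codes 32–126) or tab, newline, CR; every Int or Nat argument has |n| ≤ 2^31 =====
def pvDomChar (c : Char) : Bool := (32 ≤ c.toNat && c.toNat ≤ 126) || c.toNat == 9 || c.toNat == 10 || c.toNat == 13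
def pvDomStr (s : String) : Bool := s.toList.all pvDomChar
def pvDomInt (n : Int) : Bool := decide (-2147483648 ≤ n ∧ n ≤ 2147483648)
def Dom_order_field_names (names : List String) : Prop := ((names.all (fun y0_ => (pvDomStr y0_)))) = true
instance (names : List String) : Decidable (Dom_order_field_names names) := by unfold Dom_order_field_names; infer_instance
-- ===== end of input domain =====

-- B replaces A's single sort (whose key function rescans the priority dict per element) by one
-- classification pass into three buckets, three stable bucket sorts, and concatenation (objective: alternative).

-- ===== PORT A =====
def pvFieldPriority : List String :=
  ["id", "name", "display", "label", "status", "type", "role", "site", "location", "device",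
   "interface", "ip", "address", "prefix", "vlan", "tenant", "description", "created",
   "last_updated", "url"]

-- priority_index = {name: idx for idx, name in enumerate(_FIELD_PRIORITY)} as an association list
-- (the keys are distinct, so the dict is exactly this list in insertion order)
def pvPriorityIndex : List (String × Int) :=
  (PySem.List.enumerate pvFieldPriority 0).map (fun p => (p.2, p.1))

-- first loop of sort_key: first token with lower == token
def pvExactScan : List (String × Int) → String → Option Int
  | [], _ => none
  | (tok, idx) :: rest, lower => if lower = tok then some idx else pvExactScan rest lower

-- second loop of sort_key: first token with lower.endswith("_"+token) or lower.endswith("-"+token)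
def pvSuffixScanA : List (String × Int) → String → Option Int
  | [], _ => none
  | (tok, idx) :: rest, lower =>
      if PySem.Str.endswith lower ("_" ++ tok) || PySem.Str.endswith lower ("-" ++ tok) then some idx
      else pvSuffixScanA rest lower

-- sort_key(field) -> the 3-tuple (bucket, idx, lower); the first two components are packed into
-- one lexicographic pair so the tuple key fits PySem.List.sorted2 (lexicographic 2-key sort)
def pvSortKey (field : String) : (Int ×ₗ Int) × String :=
  let lower := PySem.Str.lower field
  match pvExactScan pvPriorityIndex lower with
  | some idx => (toLex (0, idx), lower)
  | none =>
    match pvSuffixScanA pvPriorityIndex lower with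
    | some idx => (toLex (1, idx), lower)
    | none => (toLex (2, 0), lower)

def order_field_names (names : List String) : List String :=
  PySem.List.sorted2 names (fun f => (pvSortKey f).1) (fun f => (pvSortKey f).2) false

-- ===== PORT B =====
def pvFieldPriorityB : List String :=
  ["id", "name", "display", "label", "status", "type", "role", "site", "location", "device",
   "interface", "ip", "address", "prefix", "vlan", "tenant", "description", "created",
   "last_updated", "url"]

-- index = {tok: i for i, tok in enumerate(_FIELD_PRIORITY)} as an association list
def pvIndexB : List (String × Int) :=
  (PySem.List.enumerate pvFieldPriorityB 0).map (fun p => (p.2, p.1))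

-- the for tok, j in index.items() loop with break: first suffix match
def pvSuffixScanB : List (String × Int) → String → Option Int
  | [], _ => none
  | (tok, j) :: rest, lower =>
      if PySem.Str.endswith lower ("_" ++ tok) || PySem.Str.endswith lower ("-" ++ tok) then some j
      else pvSuffixScanB rest lower

-- one iteration of B's classification loop
def pvStep (acc : List (Int × String × String) × List (Int × String × String) × List (String × String))
    (name : String) :
    List (Int × String × String) × List (Int × String × String) × List (String × String) :=
  let lower := PySem.Str.lower name
  match List.lookup lower pvIndexB with      -- i = index.get(lower)
  | some i => (acc.1 ++ [(i, lower, name)], acc.2.1, acc.2.2)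
  | none =>
    match pvSuffixScanB pvIndexB lower with
    | some j => (acc.1, acc.2.1 ++ [(j, lower, name)], acc.2.2)
    | none => (acc.1, acc.2.1, acc.2.2 ++ [(lower, name)])

def order_field_names_alt (names : List String) : List String :=
  let buckets := names.foldl pvStep ([], [], [])
  (PySem.List.sorted2 buckets.1 (fun t => t.1) (fun t => t.2.1) false).map (fun t => t.2.2)
    ++ (PySem.List.sorted2 buckets.2.1 (fun t => t.1) (fun t => t.2.1) false).map (fun t => t.2.2)
    ++ (PySem.List.sorted buckets.2.2 (fun t => t.1) false).map (fun t => t.2)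

-- ===== PRECONDITION & SPEC =====
def Spec_order_field_names (names : List String) (out : List String) : Prop := out = order_field_names_alt names
instance (names : List String) (out : List String) : Decidable (Spec_order_field_names names out) := by unfold Spec_order_field_names; infer_instance

-- ===== CLAIM (what is proved, stated in full; the proofs are below) =====
def Claim_equal_order_field_names : Prop := ∀ (names : List String), Dom_order_field_names names → Spec_order_field_names names (order_field_names names)

-- ===== LEMMAS AND PROOFS =====

-- abbreviations for the classification both programs perform
def pvLw (n : String) : String := PySem.Str.lower n
def pvE1 (n : String) : Option Int := pvExactScan pvPriorityIndex (pvLw n)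
def pvE2 (n : String) : Option Int := pvSuffixScanA pvPriorityIndex (pvLw n)
def pvCat (n : String) : Int :=
  match pvE1 n with
  | some _ => 0
  | none => match pvE2 n with | some _ => 1 | none => 2
def pvIdx (n : String) : Int :=
  match pvE1 n with
  | some i => i
  | none => match pvE2 n with | some i => i | none => 0
def pvGE (n : String) : Int × String × String := (pvIdx n, pvLw n, n)
def pvGR (n : String) : String × String := (pvLw n, n)

lemma pv_key_eq (n : String) : pvSortKey n = (toLex (pvCat n, pvIdx n), pvLw n) := by
  unfold pvSortKey pvCat pvIdx pvE1 pvE2 pvLw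
  cases h1 : pvExactScan pvPriorityIndex (PySem.Str.lower n) with
  | some i => simp [h1]
  | none =>
    cases h2 : pvSuffixScanA pvPriorityIndex (PySem.Str.lower n) with
    | some i => simp [h1, h2]
    | none => simp [h1, h2]

lemma pv_cat_cases (n : String) : pvCat n = 0 ∨ pvCat n = 1 ∨ pvCat n = 2 := by
  unfold pvCat
  cases pvE1 n with
  | some i => simp
  | none => cases pvE2 n with
    | some i => simp
    | none => simp

lemma pv_idx_of_cat2 (n : String) (h : pvCat n = 2) : pvIdx n = 0 := by
  unfold pvCat at h
  unfold pvIdx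
  cases h1 : pvE1 n with
  | some i => simp [h1] at h
  | none =>
    cases h2 : pvE2 n with
    | some i => simp [h1, h2] at h
    | none => simp

-- B's helpers compute the same scans as A's
lemma pv_lookup_eq_exactScan (l : List (String × Int)) (lower : String) :
    List.lookup lower l = pvExactScan l lower := by
  induction l with
  | nil => rfl
  | cons p t ih =>
    obtain ⟨tok, idx⟩ := p
    simp only [List.lookup, pvExactScan]
    by_cases h : lower = tok
    · simp [h]
    · simp [h, beq_eq_false_iff_ne.mpr h, ih]

lemma pv_scanB_eq_scanA (l : List (String × Int)) (lower : String) :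
    pvSuffixScanB l lower = pvSuffixScanA l lower := by
  induction l with
  | nil => rfl
  | cons p t ih =>
    obtain ⟨tok, idx⟩ := p
    simp only [pvSuffixScanB, pvSuffixScanA, ih]

lemma pv_idxB_eq : pvIndexB = pvPriorityIndex := rfl

lemma pv_step_spec (acc : List (Int × String × String) × List (Int × String × String) × List (String × String))
    (n : String) :
    pvStep acc n =
      if pvCat n = 0 then (acc.1 ++ [pvGE n], acc.2.1, acc.2.2)
      else if pvCat n = 1 then (acc.1, acc.2.1 ++ [pvGE n], acc.2.2)
      else (acc.1, acc.2.1, acc.2.2 ++ [pvGR n]) := by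
  cases h1 : pvExactScan pvPriorityIndex (PySem.Str.lower n) with
  | some i =>
    simp [pvStep, pv_idxB_eq, pv_lookup_eq_exactScan, pvCat, pvIdx, pvGE, pvE1, pvLw, h1]
  | none =>
    cases h2 : pvSuffixScanA pvPriorityIndex (PySem.Str.lower n) with
    | some j =>
      simp [pvStep, pv_idxB_eq, pv_lookup_eq_exactScan, pv_scanB_eq_scanA, pvCat, pvIdx, pvGE,
        pvE1, pvE2, pvLw, h1, h2]
    | none =>
      simp [pvStep, pv_idxB_eq, pv_lookup_eq_exactScan, pv_scanB_eq_scanA, pvCat, pvGR,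
        pvE1, pvE2, pvLw, h1, h2]

lemma pv_fold_spec (names : List String)
    (e s : List (Int × String × String)) (r : List (String × String)) :
    names.foldl pvStep (e, s, r) =
      (e ++ (names.filter (fun n => decide (pvCat n = 0))).map pvGE,
       s ++ (names.filter (fun n => decide (pvCat n = 1))).map pvGE,
       r ++ (names.filter (fun n => decide (pvCat n = 2))).map pvGR) := by
  induction names generalizing e s r with
  | nil => simp
  | cons n t ih =>
    simp only [List.foldl_cons, pv_step_spec, List.filter_cons]
    rcases pv_cat_cases n with h | h | h <;> simp [h, ih]

-- the insertion-sort loop shared by PySem.List.sorted / sorted2, abstracted over the comparison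
def pvSortBy {α : Type} (b : α → α → Bool) (xs : List α) : List α :=
  xs.foldl (fun acc x => PySem.List.insertBy b x acc) []

-- the strict "comes before" test of a two-component Python sort key
def pvLt2 {α κ₁ κ₂ : Type} [LT κ₁] [DecidableLT κ₁] [LT κ₂] [DecidableLT κ₂]
    (k1 : α → κ₁) (k2 : α → κ₂) (a c : α) : Bool :=
  decide (k1 a < k1 c) || (!decide (k1 c < k1 a) && decide (k2 a < k2 c))

lemma pv_sorted2_eq {α κ₁ κ₂ : Type} [LT κ₁] [DecidableLT κ₁] [LT κ₂] [DecidableLT κ₂]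
    (xs : List α) (k1 : α → κ₁) (k2 : α → κ₂) :
    PySem.List.sorted2 xs k1 k2 false = pvSortBy (pvLt2 k1 k2) xs := rfl

lemma pv_sorted_eq {α κ : Type} [LT κ] [DecidableLT κ] (xs : List α) (key : α → κ) :
    PySem.List.sorted xs key false = pvSortBy (fun a c => decide (key a < key c)) xs := by
  rw [PySem.List.sorted_eq_foldl_insertBy]
  rfl

lemma pv_sortBy_snoc {α : Type} (b : α → α → Bool) (l : List α) (x : α) :
    pvSortBy b (l ++ [x]) = PySem.List.insertBy b x (pvSortBy b l) := by
  simp [pvSortBy, List.foldl_append]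

lemma pv_mem_sortBy {α : Type} (b : α → α → Bool) (xs : List α) (y : α) :
    y ∈ pvSortBy b xs ↔ y ∈ xs := by
  induction xs using List.reverseRecOn with
  | nil => simp [pvSortBy]
  | append_singleton l x ih => rw [pv_sortBy_snoc, PySem.List.mem_insertBy]; simp [ih, or_comm]

lemma pv_insertBy_congr {α : Type} (b1 b2 : α → α → Bool) (x : α) (ys : List α)
    (h : ∀ y ∈ ys, b1 x y = b2 x y) :
    PySem.List.insertBy b1 x ys = PySem.List.insertBy b2 x ys := by
  induction ys with
  | nil => rfl
  | cons y t ih =>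
    simp only [PySem.List.insertBy]
    rw [h y (by simp)]
    split
    · rfl
    · rw [ih (fun z hz => h z (by simp [hz]))]

lemma pv_insertBy_low {α : Type} (b : α → α → Bool) (x : α) (ys1 ys2 : List α)
    (h : ∀ y ∈ ys2, b x y = true) :
    PySem.List.insertBy b x (ys1 ++ ys2) = PySem.List.insertBy b x ys1 ++ ys2 := by
  induction ys1 with
  | nil =>
    cases ys2 with
    | nil => rfl
    | cons y t => simp [PySem.List.insertBy, h y (by simp)]
  | cons y t ih =>
    simp only [List.cons_append, PySem.List.insertBy]
    split
    · rfl
    · rw [ih]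
      rfl

lemma pv_insertBy_high {α : Type} (b : α → α → Bool) (x : α) (ys1 ys2 : List α)
    (h : ∀ y ∈ ys1, b x y = false) :
    PySem.List.insertBy b x (ys1 ++ ys2) = ys1 ++ PySem.List.insertBy b x ys2 := by
  induction ys1 with
  | nil => rfl
  | cons y t ih =>
    have hy : b x y = false := h y (by simp)
    simp [List.cons_append, PySem.List.insertBy, hy, ih (fun z hz => h z (by simp [hz]))]

lemma pv_sortBy_congr {α : Type} (b1 b2 : α → α → Bool) (xs : List α)
    (h : ∀ a ∈ xs, ∀ c ∈ xs, b1 a c = b2 a c) :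
    pvSortBy b1 xs = pvSortBy b2 xs := by
  induction xs using List.reverseRecOn with
  | nil => rfl
  | append_singleton l x ih =>
    rw [pv_sortBy_snoc, pv_sortBy_snoc,
      ih (fun a ha c hc => h a (by simp [ha]) c (by simp [hc]))]
    refine pv_insertBy_congr _ _ _ _ (fun y hy => ?_)
    have hy' : y ∈ l := (pv_mem_sortBy b2 l y).1 hy
    exact h x (by simp) y (by simp [hy'])

lemma pv_insertBy_map {α β : Type} (g : α → β) (b : β → β → Bool) (x : α) (m : List α) :
    PySem.List.insertBy b (g x) (m.map g) =
      (PySem.List.insertBy (fun a c => b (g a) (g c)) x m).map g := by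
  induction m with
  | nil => rfl
  | cons y t ih =>
    simp only [List.map_cons, PySem.List.insertBy]
    split
    · simp
    · simp [ih]

lemma pv_sortBy_map {α β : Type} (g : α → β) (b : β → β → Bool) (l : List α) :
    pvSortBy b (l.map g) = (pvSortBy (fun a c => b (g a) (g c)) l).map g := by
  induction l using List.reverseRecOn with
  | nil => rfl
  | append_singleton l x ih =>
    rw [List.map_append, List.map_singleton, pv_sortBy_snoc, pv_sortBy_snoc, ih, pv_insertBy_map]

lemma pv_sortBy_split {α : Type} (b : α → α → Bool) (xs : List α) (p : α → Bool)
    (h : ∀ a ∈ xs, ∀ c ∈ xs, p a = true → p c = false → (b a c = true ∧ b c a = false)) :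
    pvSortBy b xs = pvSortBy b (xs.filter p) ++ pvSortBy b (xs.filter (fun x => !p x)) := by
  induction xs using List.reverseRecOn with
  | nil => rfl
  | append_singleton l x ih =>
    rw [pv_sortBy_snoc, ih (fun a ha c hc => h a (by simp [ha]) c (by simp [hc])),
      List.filter_append, List.filter_append]
    cases hp : p x with
    | true =>
      rw [pv_insertBy_low]
      · simp only [hp, Bool.not_true, List.append_nil, List.filter]
        rw [pv_sortBy_snoc]
      · intro y hy
        have hy' : y ∈ l.filter (fun x => !p x) := (pv_mem_sortBy _ _ _).1 hy
        have hyl : y ∈ l := List.mem_of_mem_filter hy'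
        have hpy : p y = false := by
          have := List.of_mem_filter hy'
          simpa using this
        exact (h x (by simp) y (by simp [hyl]) hp hpy).1
    | false =>
      rw [pv_insertBy_high]
      · simp only [hp, Bool.not_false, List.append_nil, List.filter]
        rw [pv_sortBy_snoc]
      · intro y hy
        have hy' : y ∈ l.filter p := (pv_mem_sortBy _ _ _).1 hy
        have hyl : y ∈ l := List.mem_of_mem_filter hy'
        have hpy : p y = true := List.of_mem_filter hy'
        exact (h y (by simp [hyl]) x (by simp) hpy hp).2

-- key comparisons: inside one bucket A's comparison is exactly B's sub-key comparison
lemma pv_lt_same_cat (a c : String) (cc : Int) (ha : pvCat a = cc) (hc : pvCat c = cc) :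
    pvLt2 (fun f => (pvSortKey f).1) (fun f => (pvSortKey f).2) a c =
      pvLt2 (fun n => pvIdx n) (fun n => pvLw n) a c := by
  unfold pvLt2
  simp only [pv_key_eq, ha, hc]
  simp [Prod.Lex.toLex_lt_toLex]

-- across buckets, A's comparison is decided by the bucket alone
lemma pv_lt_of_cat_lt (a c : String) (h : pvCat a < pvCat c) :
    pvLt2 (fun f => (pvSortKey f).1) (fun f => (pvSortKey f).2) a c = true ∧
      pvLt2 (fun f => (pvSortKey f).1) (fun f => (pvSortKey f).2) c a = false := by
  unfold pvLt2
  have h2 : toLex (pvCat a, pvIdx a) < toLex (pvCat c, pvIdx c) :=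
    Prod.Lex.toLex_lt_toLex.mpr (Or.inl h)
  have h1 : ¬ toLex (pvCat c, pvIdx c) < toLex (pvCat a, pvIdx a) := by
    intro contra
    rcases Prod.Lex.toLex_lt_toLex.mp contra with hlt | ⟨heq, _⟩ <;> omega
  constructor
  · simp only [pv_key_eq]
    simp [h2]
  · simp only [pv_key_eq]
    simp [h1, h2]

-- ===== VERDICT (by name: the statement is the Claim_ definition above) =====
theorem order_field_names_spec : Claim_equal_order_field_names := by
  intro names _
  unfold Spec_order_field_names order_field_names order_field_names_alt
  rw [pv_fold_spec]
  simp only [List.nil_append]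
  rw [pv_sorted2_eq, pv_sorted2_eq, pv_sorted2_eq, pv_sorted_eq]
  -- split A's single sort into the three buckets
  rw [pv_sortBy_split _ names (fun n => decide (pvCat n = 0))
    (by
      intro a _ c _ hpa hpc
      have ha : pvCat a = 0 := by simpa using hpa
      have hc : pvCat c ≠ 0 := by simpa using hpc
      exact pv_lt_of_cat_lt a c (by rcases pv_cat_cases c with h | h | h <;> omega))]
  rw [pv_sortBy_split _ (names.filter (fun n => !decide (pvCat n = 0)))
    (fun n => decide (pvCat n = 1))
    (by
      intro a haf c hcf hpa hpc
      have ha : pvCat a = 1 := by simpa using hpa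
      have hc1 : pvCat c ≠ 1 := by simpa using hpc
      have hc0 : pvCat c ≠ 0 := by simpa using List.of_mem_filter hcf
      exact pv_lt_of_cat_lt a c (by rcases pv_cat_cases c with h | h | h <;> omega))]
  rw [List.filter_filter, List.filter_filter]
  rw [List.filter_congr (p := fun a => decide (pvCat a = 1) && !decide (pvCat a = 0))
      (q := fun n => decide (pvCat n = 1)) (fun x _ => by rcases pv_cat_cases x with h | h | h <;> simp [h]),
    List.filter_congr (p := fun a => !decide (pvCat a = 1) && !decide (pvCat a = 0))
      (q := fun n => decide (pvCat n = 2)) (fun x _ => by rcases pv_cat_cases x with h | h | h <;> simp [h]),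
    List.append_assoc]
  -- now identify each bucket's sort with B's
  congr 1
  · rw [pv_sortBy_map pvGE, pv_sortBy_congr _
      (fun a c => pvLt2 (fun t => t.1) (fun t => t.2.1) (pvGE a) (pvGE c))
      (names.filter (fun n => decide (pvCat n = 0)))
      (fun a ha c hc => by
        rw [pv_lt_same_cat a c 0 (by simpa using List.of_mem_filter ha)
          (by simpa using List.of_mem_filter hc)]
        simp only [pvLt2, pvGE]
        rfl)]
    simp [Function.comp_def, pvGE]
  congr 1
  · rw [pv_sortBy_map pvGE, pv_sortBy_congr _
      (fun a c => pvLt2 (fun t => t.1) (fun t => t.2.1) (pvGE a) (pvGE c))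
      (names.filter (fun n => decide (pvCat n = 1)))
      (fun a ha c hc => by
        rw [pv_lt_same_cat a c 1 (by simpa using List.of_mem_filter ha)
          (by simpa using List.of_mem_filter hc)]
        simp only [pvLt2, pvGE]
        rfl)]
    simp [Function.comp_def, pvGE]
  · rw [pv_sortBy_map pvGR, pv_sortBy_congr _
      (fun a c => decide ((pvGR a).1 < (pvGR c).1))
      (names.filter (fun n => decide (pvCat n = 2)))
      (fun a ha c hc => by
        have ha' : pvCat a = 2 := by simpa using List.of_mem_filter ha
        have hc' : pvCat c = 2 := by simpa using List.of_mem_filter hc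
        rw [pv_lt_same_cat a c 2 ha' hc']
        simp [pvLt2, pvGR, pv_idx_of_cat2 a ha', pv_idx_of_cat2 c hc'])]
    simp [Function.comp_def, pvGR]
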